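-- pv_equiv track=rewrite | github.com/ramcsr18/ai | dnscompress/helixzip.py | expand_symbols
-- ===== SOURCE A (Python) =====
-- from typing import Iterable, List, Sequence, Tuple
--
-- def expand_symbols(rules: Sequence[Tuple[int, int]], stream: Sequence[int]) -> List[int]:
--     expanded_bases: List[int] = []
--     stack = list(reversed(stream))
--
--     while stack:
--         symbol = stack.pop()
--         if symbol < 4:
--             expanded_bases.append(symbol)
--             continue
--
--         rule_index = symbol - 4
--         if rule_index < 0 or rule_index >= len(rules):
--             raise ValueError(f"invalid rule symbol {symbol}")
--         left, right = rules[rule_index]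
--         stack.append(right)
--         stack.append(left)
--
--     return expanded_bases
-- ===== SOURCE B (Python) =====
-- from typing import List, Sequence, Tuple
--
-- def expand_symbols(rules: Sequence[Tuple[int, int]], stream: Sequence[int]) -> List[int]:
--     # Repeated-substitution (pass-based) expansion: each pass replaces every
--     # rule symbol by its (left, right) pair; iterate until a pass changes nothing.
--     symbols: List[int] = list(stream)
--     while True:
--         out: List[int] = []
--         changed = False
--         for s in symbols:
--             if s < 4:
--                 out.append(s)
--                 continue
--             idx = s - 4
--             if idx >= len(rules):
--                 raise ValueError(f"invalid rule symbol {s}")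
--             left, right = rules[idx]
--             out.append(left)
--             out.append(right)
--             changed = True
--         if not changed:
--             return out
--         symbols = out
-- ===== Notes on version B (the rewrite author's own statement) =====
-- stated objective: alternative
-- what changed: Replaces the explicit work-stack DFS expansion by whole-list repeated substitution: each pass rewrites every rule symbol into its (left,right) pair at once, iterating until a pass changes nothing.
import Mathlib
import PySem

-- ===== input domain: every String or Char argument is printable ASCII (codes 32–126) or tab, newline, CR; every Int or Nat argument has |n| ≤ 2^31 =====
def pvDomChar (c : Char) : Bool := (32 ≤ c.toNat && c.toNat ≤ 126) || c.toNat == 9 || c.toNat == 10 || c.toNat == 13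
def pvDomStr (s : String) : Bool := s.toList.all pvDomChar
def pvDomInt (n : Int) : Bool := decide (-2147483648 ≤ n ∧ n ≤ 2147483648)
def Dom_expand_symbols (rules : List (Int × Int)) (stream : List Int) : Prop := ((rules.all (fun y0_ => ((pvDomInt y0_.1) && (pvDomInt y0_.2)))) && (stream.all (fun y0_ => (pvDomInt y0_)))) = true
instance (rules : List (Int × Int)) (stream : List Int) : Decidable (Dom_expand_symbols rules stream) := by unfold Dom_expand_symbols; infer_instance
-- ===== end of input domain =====

-- B replaces A's explicit work-stack DFS by repeated whole-list substitution passes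
-- until no rule symbol remains (alternative decomposition; not claimed faster).


-- ===== PORT A =====
-- A's while-loop over the mutable stack; the stack is modelled top-first
-- (so `list(reversed(stream))` popped from the end = `stream` popped from the head).
-- The loop is driven by a fuel parameter that, under Pre_, provably exceeds the
-- number of iterations A performs; fuel exhaustion / the ValueError branch return
-- the accumulator (both unreachable under Pre_).
def expandGoA (rules : List (Int × Int)) : Nat → List Int → List Int → List Int
  | 0, _, acc => acc                                  -- fuel exhausted: unreachable under Pre_
  | f + 1, stack, acc =>
    match stack with
    | [] => acc                                       -- while stack: loop ends
    | symbol :: rest =>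
      if symbol < 4 then
        expandGoA rules f rest (acc ++ [symbol])      -- expanded_bases.append(symbol)
      else
        let ri := symbol - 4
        if ri < 0 ∨ (rules.length : Int) ≤ ri then acc  -- raise ValueError: excluded by Pre_
        else
          match PySem.List.pyGet? rules ri with
          | some (l, r) => expandGoA rules f (l :: r :: rest) acc  -- push right then left
          | none => acc                               -- unreachable (index just checked)

def expand_symbols (rules : List (Int × Int)) (stream : List Int) : List Int :=
  expandGoA rules (stream.length * 2 ^ (rules.length + 1) + 1) stream []

-- ===== PORT B =====
-- one substitution pass over the symbol list, returning (out, changed)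
def expandStepB (rules : List (Int × Int)) : List Int → List Int × Bool
  | [] => ([], false)
  | s :: rest =>
    let p := expandStepB rules rest
    if s < 4 then (s :: p.1, p.2)
    else
      match PySem.List.pyGet? rules (s - 4) with   -- idx >= len(rules) → ValueError, excluded by Pre_
      | some (l, r) => (l :: r :: p.1, true)
      | none => (p.1, p.2)                         -- unreachable under Pre_

-- the `while True` loop, fuel-driven; under Pre_ at most rules.length+1 passes change anything
def expandLoopB (rules : List (Int × Int)) : Nat → List Int → List Int
  | 0, symbols => symbols                            -- fuel exhausted: unreachable under Pre_
  | f + 1, symbols =>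
    let p := expandStepB rules symbols
    if p.2 then expandLoopB rules f p.1 else p.1

def expand_symbols_alt (rules : List (Int × Int)) (stream : List Int) : List Int :=
  expandLoopB rules (rules.length + 2) stream

-- ===== PRECONDITION & SPEC =====
-- `okS rules k s` is the static well-formedness of a grammar symbol: s is a base
-- symbol, or a rule symbol whose rule exists and whose two components are well-formed
-- at depth < k.  It is a property of the RULE TABLE (it runs neither program and
-- computes no output).  Depth rules.length is exhaustive: in any terminating
-- derivation the rule indices along one path never repeat, so its depth is at most
-- the number of rules.
def okS (rules : List (Int × Int)) : Nat → Int → Bool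
  | 0, s => decide (s < 4)
  | k + 1, s =>
    decide (s < 4) ||
      (match PySem.List.pyGet? rules (s - 4) with
       | some (l, r) => okS rules k l && okS rules k r
       | none => false)

-- Pre_ holds exactly when every stream symbol derives a finite base string:
-- it excludes the inputs where A raises ValueError (a symbol without a rule,
-- immediately or inside a derivation) and those where A never returns
-- (cyclic rule references reachable from the stream).
def Pre_expand_symbols (rules : List (Int × Int)) (stream : List Int) : Prop :=
  ∀ s ∈ stream, okS rules rules.length s = true

instance (rules : List (Int × Int)) (stream : List Int) : Decidable (Pre_expand_symbols rules stream) := by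
  unfold Pre_expand_symbols; infer_instance

def pvWitness_expand_symbols : (List (Int × Int)) × List Int := ([(0, 1), (4, 2)], [0, 5, 3])

def Spec_expand_symbols (rules : List (Int × Int)) (stream : List Int) (out : List Int) : Prop := out = expand_symbols_alt rules stream
instance (rules : List (Int × Int)) (stream : List Int) (out : List Int) : Decidable (Spec_expand_symbols rules stream out) := by unfold Spec_expand_symbols; infer_instance

-- ===== CLAIM (what is proved, stated in full; the proofs are below) =====
def Claim_equal_expand_symbols : Prop := ∀ (rules : List (Int × Int)) (stream : List Int), Dom_expand_symbols rules stream → Pre_expand_symbols rules stream → Spec_expand_symbols rules stream (expand_symbols rules stream)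

-- ===== LEMMAS AND PROOFS =====

-- the canonical full expansion of a symbol, by depth-bounded recursion
def canonK (rules : List (Int × Int)) : Nat → Int → List Int
  | 0, s => [s]
  | k + 1, s =>
    if s < 4 then [s]
    else
      match PySem.List.pyGet? rules (s - 4) with
      | some (l, r) => canonK rules k l ++ canonK rules k r
      | none => [s]

def canon (rules : List (Int × Int)) (s : Int) : List Int := canonK rules rules.length s

-- derivation depth of a symbol, depth-bounded
def depthOk (rules : List (Int × Int)) : Nat → Int → Nat
  | 0, _ => 0
  | k + 1, s =>
    if s < 4 then 0 else
      match PySem.List.pyGet? rules (s - 4) with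
      | some (l, r) => max (depthOk rules k l) (depthOk rules k r) + 1
      | none => 0

def depthS (rules : List (Int × Int)) (s : Int) : Nat := depthOk rules rules.length s

-- destructing okS on a non-base symbol
theorem okS_elim (rules : List (Int × Int)) {k : Nat} {s : Int}
    (hok : okS rules (k + 1) s = true) (hbase : ¬ s < 4) :
    ∃ l r, PySem.List.pyGet? rules (s - 4) = some (l, r) ∧
      okS rules k l = true ∧ okS rules k r = true := by
  simp only [okS, hbase, decide_false, Bool.false_or] at hok
  cases hget : PySem.List.pyGet? rules (s - 4) with
  | none => rw [hget] at hok; simp at hok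
  | some p =>
    obtain ⟨l, r⟩ := p
    rw [hget] at hok
    simp only [Bool.and_eq_true] at hok
    exact ⟨l, r, rfl, hok.1, hok.2⟩

theorem okS_pos (rules : List (Int × Int)) {k : Nat} {s : Int}
    (hok : okS rules k s = true) (hbase : ¬ s < 4) : ∃ k', k = k' + 1 := by
  cases k with
  | zero => simp [okS, hbase] at hok
  | succ k => exact ⟨k, rfl⟩

-- a some-result of pyGet? at a nonnegative index means the index is in range
theorem pyGet?_lt (rules : List (Int × Int)) {s : Int} (hbase : ¬ s < 4)
    {p : Int × Int} (h : PySem.List.pyGet? rules (s - 4) = some p) :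
    s - 4 < (rules.length : Int) := by
  have hs : s - 4 = (((s - 4).toNat : Nat) : Int) := by omega
  rw [hs, PySem.List.pyGet?_natCast] at h
  obtain ⟨hlt, -⟩ := List.getElem?_eq_some_iff.mp h
  omega

-- monotonicity of okS in the depth bound
theorem okS_mono (rules : List (Int × Int)) :
    ∀ k : Nat, ∀ s : Int, okS rules k s = true → ∀ j, k ≤ j → okS rules j s = true := by
  intro k
  induction k with
  | zero =>
    intro s hok j _
    have hbase : s < 4 := by simpa [okS] using hok
    cases j with
    | zero => simpa [okS]
    | succ j => simp [okS, hbase]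
  | succ k ih =>
    intro s hok j hj
    by_cases hbase : s < 4
    · cases j with
      | zero => simp [okS, hbase]
      | succ j => simp [okS, hbase]
    · obtain ⟨l, r, hget, hl, hr⟩ := okS_elim rules hok hbase
      obtain ⟨j', rfl⟩ : ∃ j', j = j' + 1 := ⟨j - 1, by omega⟩
      simp [okS, hget, ih l hl j' (by omega), ih r hr j' (by omega)]

-- for a symbol well-formed at depth k, any fuel ≥ k expands the same
theorem canonK_stable (rules : List (Int × Int)) :
    ∀ k : Nat, ∀ s : Int, okS rules k s = true → ∀ j, k ≤ j →
      canonK rules j s = canonK rules k s := by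
  intro k
  induction k with
  | zero =>
    intro s hok j _
    have hbase : s < 4 := by simpa [okS] using hok
    cases j with
    | zero => rfl
    | succ j => simp [canonK, hbase]
  | succ k ih =>
    intro s hok j hj
    by_cases hbase : s < 4
    · cases j with
      | zero => simp [canonK, hbase]
      | succ j => simp [canonK, hbase]
    · obtain ⟨l, r, hget, hl, hr⟩ := okS_elim rules hok hbase
      obtain ⟨j', rfl⟩ : ∃ j', j = j' + 1 := ⟨j - 1, by omega⟩
      simp only [canonK, hbase, if_false, hget]
      rw [ih l hl j' (by omega), ih r hr j' (by omega)]

-- same stability for the depth function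
theorem depthOk_stable (rules : List (Int × Int)) :
    ∀ k : Nat, ∀ s : Int, okS rules k s = true → ∀ j, k ≤ j →
      depthOk rules j s = depthOk rules k s := by
  intro k
  induction k with
  | zero =>
    intro s hok j _
    have hbase : s < 4 := by simpa [okS] using hok
    cases j with
    | zero => rfl
    | succ j => simp [depthOk, hbase]
  | succ k ih =>
    intro s hok j hj
    by_cases hbase : s < 4
    · cases j with
      | zero => simp [depthOk, hbase]
      | succ j => simp [depthOk, hbase]
    · obtain ⟨l, r, hget, hl, hr⟩ := okS_elim rules hok hbase
      obtain ⟨j', rfl⟩ : ∃ j', j = j' + 1 := ⟨j - 1, by omega⟩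
      simp only [depthOk, hbase, if_false, hget]
      rw [ih l hl j' (by omega), ih r hr j' (by omega)]

theorem canonK_base (rules : List (Int × Int)) (k : Nat) {s : Int} (hs : s < 4) :
    canonK rules k s = [s] := by
  cases k with
  | zero => rfl
  | succ k => simp [canonK, hs]

theorem canon_base (rules : List (Int × Int)) {s : Int} (hs : s < 4) : canon rules s = [s] :=
  canonK_base rules rules.length hs

theorem depthS_base (rules : List (Int × Int)) {s : Int} (hs : s < 4) : depthS rules s = 0 := by
  unfold depthS
  cases h : rules.length with
  | zero => rfl
  | succ k => simp [depthOk, hs]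

theorem canonK_ne_nil (rules : List (Int × Int)) (k : Nat) (s : Int) : canonK rules k s ≠ [] := by
  induction k generalizing s with
  | zero => simp [canonK]
  | succ k ih =>
    simp only [canonK]
    split
    · simp
    · split
      · rename_i l r _; exact List.append_ne_nil_of_left_ne_nil (ih l) _
      · simp

theorem canonK_length_le (rules : List (Int × Int)) (k : Nat) (s : Int) :
    (canonK rules k s).length ≤ 2 ^ k := by
  induction k generalizing s with
  | zero => simp [canonK]
  | succ k ih =>
    simp only [canonK]
    split
    · simpa using Nat.one_le_two_pow
    · split
      · rename_i l r _
        calc (canonK rules k l ++ canonK rules k r).length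
            = (canonK rules k l).length + (canonK rules k r).length := List.length_append ..
          _ ≤ 2 ^ k + 2 ^ k := Nat.add_le_add (ih l) (ih r)
          _ = 2 ^ (k + 1) := by ring
      · simpa using Nat.one_le_two_pow

theorem depthOk_le (rules : List (Int × Int)) (k : Nat) (s : Int) : depthOk rules k s ≤ k := by
  induction k generalizing s with
  | zero => simp [depthOk]
  | succ k ih =>
    simp only [depthOk]
    split
    · omega
    · split
      · rename_i l r _
        have := ih l; have := ih r
        omega
      · omega

-- unfolding a well-formed non-base symbol: its expansion is the concatenation of the
-- components' expansions, its depth exceeds theirs, and the components are well-formed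
theorem canon_rule (rules : List (Int × Int)) {s l r : Int}
    (hok : okS rules rules.length s = true) (hbase : ¬ s < 4)
    (hget : PySem.List.pyGet? rules (s - 4) = some (l, r)) :
    canon rules s = canon rules l ++ canon rules r ∧
    okS rules rules.length l = true ∧ okS rules rules.length r = true ∧
    depthS rules l < depthS rules s ∧ depthS rules r < depthS rules s := by
  obtain ⟨L', hL⟩ := okS_pos rules hok hbase
  rw [hL] at hok
  obtain ⟨l', r', hget', hl, hr⟩ := okS_elim rules hok hbase
  rw [hget] at hget'
  obtain ⟨h1, h2⟩ : l = l' ∧ r = r' := by simpa using hget'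
  subst h1; subst h2
  have hokl : okS rules rules.length l = true := okS_mono rules L' l hl rules.length (by omega)
  have hokr : okS rules rules.length r = true := okS_mono rules L' r hr rules.length (by omega)
  refine ⟨?_, hokl, hokr, ?_, ?_⟩
  · have : canon rules s = canonK rules (L' + 1) s := by rw [canon, hL]
    rw [this]
    simp only [canonK, hbase, if_false, hget]
    rw [canonK_stable rules L' l hl L' (le_refl _)]
    unfold canon
    rw [canonK_stable rules L' l hl rules.length (by omega),
        canonK_stable rules L' r hr rules.length (by omega)]
  · have hd : depthS rules s = max (depthOk rules L' l) (depthOk rules L' r) + 1 := by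
      unfold depthS
      rw [hL]
      simp [depthOk, hbase, hget]
    have : depthS rules l = depthOk rules L' l := by
      unfold depthS
      rw [depthOk_stable rules L' l hl rules.length (by omega)]
    omega
  · have hd : depthS rules s = max (depthOk rules L' l) (depthOk rules L' r) + 1 := by
      unfold depthS
      rw [hL]
      simp [depthOk, hbase, hget]
    have : depthS rules r = depthOk rules L' r := by
      unfold depthS
      rw [depthOk_stable rules L' r hr rules.length (by omega)]
    omega

-- a non-base well-formed symbol always owns a rule
theorem okS_get (rules : List (Int × Int)) {s : Int}
    (hok : okS rules rules.length s = true) (hbase : ¬ s < 4) :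
    ∃ l r, PySem.List.pyGet? rules (s - 4) = some (l, r) := by
  obtain ⟨L', hL⟩ := okS_pos rules hok hbase
  rw [hL] at hok
  obtain ⟨l, r, hget, _, _⟩ := okS_elim rules hok hbase
  exact ⟨l, r, hget⟩

-- ---- A side ----

def nstep (rules : List (Int × Int)) (s : Int) : Nat := 2 * (canon rules s).length - 1
def nsum (rules : List (Int × Int)) (stack : List Int) : Nat := (stack.map (nstep rules)).sum

theorem canon_len_pos (rules : List (Int × Int)) (s : Int) : 1 ≤ (canon rules s).length := by
  have := canonK_ne_nil rules rules.length s
  cases h : canon rules s with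
  | nil => exact absurd h this
  | cons a t => simp

theorem nstep_pos (rules : List (Int × Int)) (s : Int) : 1 ≤ nstep rules s := by
  have := canon_len_pos rules s
  unfold nstep; omega

theorem goA_eq (rules : List (Int × Int)) :
    ∀ f : Nat, ∀ stack acc : List Int, (∀ s ∈ stack, okS rules rules.length s = true) →
      nsum rules stack ≤ f →
      expandGoA rules f stack acc = acc ++ stack.flatMap (canon rules) := by
  intro f
  induction f with
  | zero =>
    intro stack acc hg hf
    cases stack with
    | nil => simp [expandGoA]
    | cons s rest =>
      exfalso
      have := nstep_pos rules s
      simp [nsum] at hf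
      omega
  | succ f ih =>
    intro stack acc hg hf
    cases stack with
    | nil => simp [expandGoA]
    | cons s rest =>
      have hgs := hg s (by simp)
      have hgrest : ∀ t ∈ rest, okS rules rules.length t = true := fun t ht => hg t (by simp [ht])
      by_cases hbase : s < 4
      · have hrec := ih rest (acc ++ [s]) hgrest (by
          simp only [nsum, List.map_cons, List.sum_cons] at hf ⊢
          have := nstep_pos rules s
          omega)
        simp only [expandGoA, hbase, if_true]
        rw [hrec]
        simp [canon_base rules hbase]
      · obtain ⟨l, r, hget⟩ := okS_get rules hgs hbase
        have hlt : s - 4 < (rules.length : Int) := pyGet?_lt rules hbase hget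
        have hguard : ¬ (s - 4 < 0 ∨ (rules.length : Int) ≤ s - 4) := by omega
        obtain ⟨hcr, hokl, hokr, _, _⟩ := canon_rule rules hgs hbase hget
        have hlen1 := canon_len_pos rules l
        have hlen2 := canon_len_pos rules r
        have hnstep : nstep rules s = nstep rules l + nstep rules r + 1 := by
          simp [nstep, hcr]
          omega
        have hfuel : nsum rules (l :: r :: rest) ≤ f := by
          simp only [nsum, List.map_cons, List.sum_cons] at hf ⊢
          omega
        have hgood2 : ∀ t ∈ l :: r :: rest, okS rules rules.length t = true := by
          intro t ht
          simp only [List.mem_cons] at ht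
          rcases ht with rfl | rfl | ht
          · exact hokl
          · exact hokr
          · exact hgrest t ht
        have hrec := ih _ acc hgood2 hfuel
        simp only [expandGoA, hbase, if_false, hguard, hget]
        rw [hrec]
        simp [List.flatMap_cons, hcr]

theorem nsum_le (rules : List (Int × Int)) (stack : List Int) :
    nsum rules stack ≤ stack.length * 2 ^ (rules.length + 1) := by
  induction stack with
  | nil => simp [nsum]
  | cons s rest ih =>
    have h1 : nstep rules s ≤ 2 ^ (rules.length + 1) := by
      have := canonK_length_le rules rules.length s
      unfold nstep canon
      have h2 : 2 ^ (rules.length + 1) = 2 * 2 ^ rules.length := by ring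
      omega
    have hmul : (rest.length + 1) * 2 ^ (rules.length + 1)
        = rest.length * 2 ^ (rules.length + 1) + 2 ^ (rules.length + 1) := by ring
    simp only [nsum, List.map_cons, List.sum_cons, List.length_cons] at ih ⊢
    omega

theorem expand_symbols_flat (rules : List (Int × Int)) (stream : List Int)
    (hs : ∀ s ∈ stream, okS rules rules.length s = true) :
    expand_symbols rules stream = stream.flatMap (canon rules) := by
  have h := goA_eq rules (stream.length * 2 ^ (rules.length + 1) + 1) stream [] hs
    (by have := nsum_le rules stream; omega)
  simpa [expand_symbols] using h

-- ---- B side ----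

def maxD (rules : List (Int × Int)) (l : List Int) : Nat :=
  (l.map (depthS rules)).foldr max 0

theorem maxD_cons (rules : List (Int × Int)) (a : Int) (l : List Int) :
    maxD rules (a :: l) = max (depthS rules a) (maxD rules l) := rfl

theorem maxD_le (rules : List (Int × Int)) {l : List Int} {m : Nat}
    (h : ∀ t ∈ l, depthS rules t ≤ m) : maxD rules l ≤ m := by
  induction l with
  | nil => simp [maxD]
  | cons a t ih =>
    rw [maxD_cons]
    exact max_le (h a (by simp)) (ih (fun x hx => h x (by simp [hx])))

theorem depthS_le_maxD (rules : List (Int × Int)) {l : List Int} {t : Int} (h : t ∈ l) :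
    depthS rules t ≤ maxD rules l := by
  induction l with
  | nil => simp at h
  | cons a r ih =>
    rw [maxD_cons]
    simp only [List.mem_cons] at h
    rcases h with rfl | h
    · exact Nat.le_max_left _ _
    · exact le_trans (ih h) (Nat.le_max_right _ _)

-- a well-formed non-base symbol has positive depth
theorem depthS_pos (rules : List (Int × Int)) {s : Int}
    (hok : okS rules rules.length s = true) (hbase : ¬ s < 4) : 1 ≤ depthS rules s := by
  obtain ⟨L', hL⟩ := okS_pos rules hok hbase
  rw [hL] at hok
  obtain ⟨l, r, hget, _, _⟩ := okS_elim rules hok hbase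
  unfold depthS
  rw [hL]
  simp [depthOk, hbase, hget]

-- one pass keeps every symbol well-formed
theorem stepB_good (rules : List (Int × Int)) :
    ∀ symbols : List Int, (∀ s ∈ symbols, okS rules rules.length s = true) →
      ∀ t ∈ (expandStepB rules symbols).1, okS rules rules.length t = true := by
  intro symbols
  induction symbols with
  | nil => intro _ t ht; simp [expandStepB] at ht
  | cons s rest ih =>
    intro hg t ht
    have hgs := hg s (by simp)
    have hgrest : ∀ x ∈ rest, okS rules rules.length x = true := fun x hx => hg x (by simp [hx])
    by_cases hbase : s < 4
    · simp only [expandStepB, hbase, if_true, List.mem_cons] at ht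
      rcases ht with rfl | ht
      · exact hgs
      · exact ih hgrest t ht
    · obtain ⟨l, r, hget⟩ := okS_get rules hgs hbase
      obtain ⟨_, hokl, hokr, _, _⟩ := canon_rule rules hgs hbase hget
      simp only [expandStepB, hbase, if_false, hget, List.mem_cons] at ht
      rcases ht with rfl | rfl | ht
      · exact hokl
      · exact hokr
      · exact ih hgrest t ht

-- one pass preserves the full expansion
theorem stepB_flat (rules : List (Int × Int)) :
    ∀ symbols : List Int, (∀ s ∈ symbols, okS rules rules.length s = true) →
      ((expandStepB rules symbols).1).flatMap (canon rules) = symbols.flatMap (canon rules) := by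
  intro symbols
  induction symbols with
  | nil => intro _; simp [expandStepB]
  | cons s rest ih =>
    intro hg
    have hgs := hg s (by simp)
    have hgrest : ∀ x ∈ rest, okS rules rules.length x = true := fun x hx => hg x (by simp [hx])
    by_cases hbase : s < 4
    · simp only [expandStepB, hbase, if_true]
      simp [List.flatMap_cons, ih hgrest]
    · obtain ⟨l, r, hget⟩ := okS_get rules hgs hbase
      obtain ⟨hcr, _, _, _, _⟩ := canon_rule rules hgs hbase hget
      simp only [expandStepB, hbase, if_false, hget]
      simp [List.flatMap_cons, ih hgrest, hcr]

-- an all-base list is a fixpoint of the pass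
theorem stepB_of_base (rules : List (Int × Int)) :
    ∀ symbols : List Int, (∀ s ∈ symbols, s < 4) →
      expandStepB rules symbols = (symbols, false) := by
  intro symbols
  induction symbols with
  | nil => intro _; rfl
  | cons s rest ih =>
    intro hb
    have hs := hb s (by simp)
    simp only [expandStepB, hs, if_true, ih (fun x hx => hb x (by simp [hx]))]

-- if the pass reports no change, every symbol was a base symbol
theorem stepB_false_base (rules : List (Int × Int)) :
    ∀ symbols : List Int, (∀ s ∈ symbols, okS rules rules.length s = true) →
      (expandStepB rules symbols).2 = false → ∀ s ∈ symbols, s < 4 := by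
  intro symbols
  induction symbols with
  | nil => intro _ _ s hs; simp at hs
  | cons s rest ih =>
    intro hg hfalse t ht
    have hgs := hg s (by simp)
    have hgrest : ∀ x ∈ rest, okS rules rules.length x = true := fun x hx => hg x (by simp [hx])
    by_cases hbase : s < 4
    · simp only [expandStepB, hbase, if_true] at hfalse
      rcases ht with _ | ht
      · exact hbase
      · exact ih hgrest hfalse t (by assumption)
    · exfalso
      obtain ⟨l, r, hget⟩ := okS_get rules hgs hbase
      simp [expandStepB, hbase, hget] at hfalse

-- if the pass changed something, every produced symbol has depth below the maximum
theorem stepB_rank (rules : List (Int × Int)) :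
    ∀ symbols : List Int, (∀ s ∈ symbols, okS rules rules.length s = true) →
      (expandStepB rules symbols).2 = true →
      ∀ t ∈ (expandStepB rules symbols).1, depthS rules t + 1 ≤ maxD rules symbols := by
  intro symbols
  induction symbols with
  | nil => intro _ h; simp [expandStepB] at h
  | cons s rest ih =>
    intro hg htrue t ht
    have hgs := hg s (by simp)
    have hgrest : ∀ x ∈ rest, okS rules rules.length x = true := fun x hx => hg x (by simp [hx])
    have hmono : maxD rules rest ≤ maxD rules (s :: rest) := by
      rw [maxD_cons]; exact Nat.le_max_right _ _
    by_cases hbase : s < 4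
    · simp only [expandStepB, hbase, if_true, List.mem_cons] at htrue ht
      have hrest := ih hgrest htrue
      rcases ht with rfl | ht
      · -- t = s, a base symbol of depth 0; the change came from rest, so maxD rest ≥ 1
        have h1 : depthS rules t = 0 := depthS_base rules hbase
        have : ¬ ∀ x ∈ rest, x < 4 := by
          intro hall
          rw [stepB_of_base rules rest hall] at htrue
          simp at htrue
        simp only [not_forall] at this
        obtain ⟨x, hx, hx4⟩ := this
        have := depthS_pos rules (hgrest x hx) hx4
        have := depthS_le_maxD rules hx
        omega
      · have := hrest t ht
        omega
    · obtain ⟨l, r, hget⟩ := okS_get rules hgs hbase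
      obtain ⟨_, _, _, hdl, hdr⟩ := canon_rule rules hgs hbase hget
      have hsmax : depthS rules s ≤ maxD rules (s :: rest) := depthS_le_maxD rules (by simp)
      simp only [expandStepB, hbase, if_false, hget, List.mem_cons] at ht
      rcases ht with rfl | rfl | ht
      · omega
      · omega
      · by_cases hch : (expandStepB rules rest).2 = true
        · have := ih hgrest hch t ht
          omega
        · -- rest unchanged: t ∈ rest and all of rest is base
          simp only [Bool.not_eq_true] at hch
          have hb := stepB_false_base rules rest hgrest hch
          rw [stepB_of_base rules rest hb] at ht
          have h0 : depthS rules t = 0 := depthS_base rules (hb t ht)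
          have := depthS_pos rules hgs hbase
          omega

theorem flatMap_canon_base (rules : List (Int × Int)) :
    ∀ symbols : List Int, (∀ s ∈ symbols, s < 4) →
      symbols.flatMap (canon rules) = symbols := by
  intro symbols
  induction symbols with
  | nil => simp
  | cons a t ih =>
    intro hb
    simp [List.flatMap_cons, canon_base rules (hb a (by simp)),
          ih (fun x hx => hb x (by simp [hx]))]

theorem loopB_eq (rules : List (Int × Int)) :
    ∀ f : Nat, ∀ symbols : List Int, (∀ s ∈ symbols, okS rules rules.length s = true) →
      maxD rules symbols < f →
      expandLoopB rules f symbols = symbols.flatMap (canon rules) := by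
  intro f
  induction f with
  | zero => intro symbols _ h; omega
  | succ f ih =>
    intro symbols hg hf
    by_cases hch : (expandStepB rules symbols).2 = true
    · have hrank := stepB_rank rules symbols hg hch
      have hmaxpos : 1 ≤ maxD rules symbols := by
        by_contra h
        have h0 : maxD rules symbols = 0 := by omega
        have hall : ∀ s ∈ symbols, s < 4 := by
          intro s hs
          by_contra hs4
          have := depthS_pos rules (hg s hs) hs4
          have := depthS_le_maxD rules hs
          omega
        rw [stepB_of_base rules symbols hall] at hch
        simp at hch
      have hmr : maxD rules (expandStepB rules symbols).1 < f := by
        have : maxD rules (expandStepB rules symbols).1 ≤ maxD rules symbols - 1 :=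
          maxD_le rules (fun t ht => by have := hrank t ht; omega)
        omega
      have hgood := stepB_good rules symbols hg
      have hrec := ih (expandStepB rules symbols).1 hgood hmr
      simp only [expandLoopB, hch, if_true]
      rw [hrec, stepB_flat rules symbols hg]
    · simp only [Bool.not_eq_true] at hch
      have hb := stepB_false_base rules symbols hg hch
      have hfix := stepB_of_base rules symbols hb
      simp only [expandLoopB, hfix]
      exact (flatMap_canon_base rules symbols hb).symm

theorem maxD_lt_fuel (rules : List (Int × Int)) (stream : List Int) :
    maxD rules stream < rules.length + 2 := by
  have : maxD rules stream ≤ rules.length :=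
    maxD_le rules (fun t _ => depthOk_le rules rules.length t)
  omega

-- ===== VERDICT (by name: the statement is the Claim_ definition above) =====
theorem expand_symbols_spec : Claim_equal_expand_symbols := by
  intro rules stream _hdom hpre
  unfold Spec_expand_symbols expand_symbols_alt
  rw [expand_symbols_flat rules stream hpre,
      loopB_eq rules (rules.length + 2) stream hpre (maxD_lt_fuel rules stream)]
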